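-- pv_equiv track=rewrite | github.com/sapienzastudents/exercises | Progettazione di Algoritmi/canale2/2018_2019/esercizi/esame.py | es2
-- ===== SOURCE A (Python) =====
-- def es2(n):
--     # t[i][j] = numero di stringhe lunghe j che terminano con i
--     T = [[0 for _ in range(n)] for _ in range(3)]
--
--     T[0][0] = 1
--     T[1][0] = 1
--     T[2][0] = 1
--
--     for i in range(1, n):
--         # Se aggiungo 0 devo stare attento a un eventuale 2 precedente.
--         T[0][i] = T[0][i - 1] + T[1][i - 1]
--
--         # Se aggiungo 1 non ci sono problemi
--         T[1][i] = T[0][i - 1] + T[1][i - 1] + T[2][i - 1]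
--
--         # Se aggiungo 2 devo stare attento a un eventuale 0 precedente.
--         T[2][i] = T[1][i - 1] + T[2][i - 1]
--
--     return T[0][i - 1] + T[1][i - 1] + T[2][i - 1]
-- ===== SOURCE B (Python) =====
-- def es2(n):
--     # Fast exact re-implementation: by symmetry ending-in-0 and ending-in-2 counts
--     # are equal, so the DP reduces to the 2x2 linear map (x, y) -> (x+y, 2x+y).
--     # Raise it to the needed power by binary exponentiation (O(log n) steps).
--     def mul(P, Q):
--         return (P[0] * Q[0] + P[1] * Q[2], P[0] * Q[1] + P[1] * Q[3],
--                 P[2] * Q[0] + P[3] * Q[2], P[2] * Q[1] + P[3] * Q[3])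
--
--     R = (1, 0, 0, 1)
--     M = (1, 1, 2, 1)
--     e = n - 2
--     while e > 0:
--         if e & 1:
--             R = mul(R, M)
--         M = mul(M, M)
--         e >>= 1
--     x = R[0] + R[1]
--     y = R[2] + R[3]
--     return 2 * x + y
-- ===== Notes on version B (the rewrite author's own statement) =====
-- stated objective: faster
-- what changed: Replaced the O(n) full-table DP with binary exponentiation of the symmetry-reduced 2x2 transition matrix (x,y)->(x+y,2x+y), reproducing A's off-by-one return (the count for length n-1).
-- outside the precondition, e.g. on es2(1): A raises UnboundLocalError, B returns 3; on es2(0): A raises IndexError, B returns 3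
import Mathlib
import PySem

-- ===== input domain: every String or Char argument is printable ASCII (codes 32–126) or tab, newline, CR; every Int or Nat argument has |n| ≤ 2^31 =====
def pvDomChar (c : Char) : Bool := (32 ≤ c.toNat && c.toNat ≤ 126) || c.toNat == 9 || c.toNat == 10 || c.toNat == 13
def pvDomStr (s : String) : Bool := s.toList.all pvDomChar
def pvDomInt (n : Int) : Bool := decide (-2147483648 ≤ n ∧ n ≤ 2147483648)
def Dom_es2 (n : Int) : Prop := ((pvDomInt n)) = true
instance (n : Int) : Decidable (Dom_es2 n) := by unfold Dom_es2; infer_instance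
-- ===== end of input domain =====

-- B replaces the O(n) full-table DP by binary exponentiation of the symmetry-reduced
-- 2x2 transition matrix (objective: faster, O(log n) multiplications).

-- ===== PORT A =====
-- state of the loop: the three table rows and the last loop index i
def es2Body (st : List Int × List Int × List Int × Int) (i : Int) :
    List Int × List Int × List Int × Int :=
  let t0 := st.1; let t1 := st.2.1; let t2 := st.2.2.1
  -- T[0][i] = T[0][i-1] + T[1][i-1]
  let t0' := PySem.List.pySetD t0 i
      (PySem.List.pyGetD t0 (i - 1) 0 + PySem.List.pyGetD t1 (i - 1) 0)
  -- T[1][i] = T[0][i-1] + T[1][i-1] + T[2][i-1]   (reads the updated T[0], as Python does)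
  let t1' := PySem.List.pySetD t1 i
      (PySem.List.pyGetD t0' (i - 1) 0 + PySem.List.pyGetD t1 (i - 1) 0 +
        PySem.List.pyGetD t2 (i - 1) 0)
  -- T[2][i] = T[1][i-1] + T[2][i-1]
  let t2' := PySem.List.pySetD t2 i
      (PySem.List.pyGetD t1' (i - 1) 0 + PySem.List.pyGetD t2 (i - 1) 0)
  (t0', t1', t2', i)

def es2 (n : Int) : Int :=
  let zeros : List Int := (PySem.List.pyRange 0 n 1).map (fun _ => (0 : Int))
  let T0 := PySem.List.pySetD zeros 0 1
  let T1 := PySem.List.pySetD zeros 0 1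
  let T2 := PySem.List.pySetD zeros 0 1
  let s := (PySem.List.pyRange 1 n 1).foldl es2Body (T0, T1, T2, 0)
  PySem.List.pyGetD s.1 (s.2.2.2 - 1) 0 + PySem.List.pyGetD s.2.1 (s.2.2.2 - 1) 0 +
    PySem.List.pyGetD s.2.2.1 (s.2.2.2 - 1) 0

-- ===== PORT B =====
-- 2x2 integer matrix as (a, b, c, d) = [[a, b], [c, d]]
def pvMul (P Q : Int × Int × Int × Int) : Int × Int × Int × Int :=
  (P.1 * Q.1 + P.2.1 * Q.2.2.1, P.1 * Q.2.1 + P.2.1 * Q.2.2.2,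
   P.2.2.1 * Q.1 + P.2.2.2 * Q.2.2.1, P.2.2.1 * Q.2.1 + P.2.2.2 * Q.2.2.2)

-- the while-loop of Source B: while e > 0: if e & 1: R = R*M; M = M*M; e >>= 1
def pvPowLoop (e : Int) (R M : Int × Int × Int × Int) : Int × Int × Int × Int :=
  if 0 < e then
    pvPowLoop (e >>> (1 : Nat)) (if PySem.Int.band e 1 ≠ 0 then pvMul R M else R) (pvMul M M)
  else R
termination_by e.toNat
decreasing_by
  rename_i h
  rw [Int.shiftRight_eq_div_pow]
  omega

def es2_alt (n : Int) : Int :=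
  let F := pvPowLoop (n - 2) (1, 0, 0, 1) (1, 1, 2, 1)
  let x := F.1 + F.2.1
  let y := F.2.2.1 + F.2.2.2
  2 * x + y

-- ===== PRECONDITION & SPEC =====
-- Pre_ excludes n < 2, where Python A raises (IndexError for n ≤ 0, UnboundLocalError for n = 1).
def Pre_es2 (n : Int) : Prop := 2 ≤ n
instance (n : Int) : Decidable (Pre_es2 n) := by unfold Pre_es2; infer_instance
def pvWitness_es2 : Int := 5
def Spec_es2 (n : Int) (out : Int) : Prop := out = es2_alt n
instance (n : Int) (out : Int) : Decidable (Spec_es2 n out) := by unfold Spec_es2; infer_instance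

-- ===== CLAIM (what is proved, stated in full; the proofs are below) =====
def Claim_equal_es2 : Prop := ∀ (n : Int), Dom_es2 n → Pre_es2 n → Spec_es2 n (es2 n)

-- ===== LEMMAS AND PROOFS =====

-- reference recurrences
def pvG : Nat → Int × Int × Int
  | 0 => (1, 1, 1)
  | k + 1 =>
      let g := pvG k
      (g.1 + g.2.1, g.1 + g.2.1 + g.2.2, g.2.1 + g.2.2)

def pvP : Nat → Int × Int
  | 0 => (1, 1)
  | k + 1 => let p := pvP k; (p.1 + p.2, 2 * p.1 + p.2)

def pvPow (M : Int × Int × Int × Int) : Nat → Int × Int × Int × Int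
  | 0 => (1, 0, 0, 1)
  | k + 1 => pvMul (pvPow M k) M

theorem pvMul_assoc (P Q R : Int × Int × Int × Int) :
    pvMul (pvMul P Q) R = pvMul P (pvMul Q R) := by
  simp only [pvMul]; obtain ⟨a, b, c, d⟩ := P
  refine Prod.ext ?_ (Prod.ext ?_ (Prod.ext ?_ ?_)) <;> dsimp <;> ring

theorem pvMul_one (P : Int × Int × Int × Int) : pvMul P (1, 0, 0, 1) = P := by
  simp [pvMul]

theorem pvOne_mul (P : Int × Int × Int × Int) : pvMul (1, 0, 0, 1) P = P := by
  simp [pvMul]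

theorem pvPow_succ (M : Int × Int × Int × Int) (k : Nat) :
    pvPow M (k + 1) = pvMul (pvPow M k) M := rfl

theorem pvPow_succ_left (M : Int × Int × Int × Int) (k : Nat) :
    pvPow M (k + 1) = pvMul M (pvPow M k) := by
  induction k with
  | zero => simp [pvPow, pvMul_one, pvOne_mul]
  | succ k ih => rw [pvPow_succ, ih, pvMul_assoc, ← pvPow_succ, ih]

theorem pvPow_two_mul (M : Int × Int × Int × Int) (k : Nat) :
    pvPow (pvMul M M) k = pvPow M (2 * k) := by
  induction k with
  | zero => rfl
  | succ k ih =>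
      rw [pvPow_succ, ih]
      have h2 : 2 * (k + 1) = (2 * k + 1) + 1 := by ring
      rw [h2, pvPow_succ, pvPow_succ, pvMul_assoc]

theorem pvPowLoop_eq (fuel : Nat) : ∀ (e : Int), e.toNat ≤ fuel → 0 ≤ e →
    ∀ R M, pvPowLoop e R M = pvMul R (pvPow M e.toNat) := by
  induction fuel with
  | zero =>
      intro e hf he R M
      have h0 : e = 0 := by omega
      rw [pvPowLoop.eq_def]
      simp [h0, pvPow, pvMul_one]
  | succ f ih =>
      intro e hf he R M
      rw [pvPowLoop.eq_def]
      by_cases h : 0 < e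
      · simp only [h, if_true]
        have hsh : e >>> (1 : Nat) = e / 2 := by
          simpa using Int.shiftRight_eq_div_pow e 1
        rw [hsh, ih (e / 2) (by omega) (by omega)]
        have htn : (e / 2).toNat = e.toNat / 2 := by omega
        rw [htn, pvPow_two_mul]
        have hband : PySem.Int.band e 1 = ((e.toNat &&& (1 : Int).toNat : Nat) : Int) :=
          PySem.Int.band_of_nonneg he (by norm_num)
        have hmod : (e.toNat &&& (1 : Int).toNat) = e.toNat % 2 := Nat.and_one_is_mod _
        by_cases hp : e.toNat % 2 = 1
        · have hne : PySem.Int.band e 1 ≠ 0 := by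
            rw [hband, hmod, hp]; norm_num
          rw [if_pos hne]
          calc pvMul (pvMul R M) (pvPow M (2 * (e.toNat / 2)))
              = pvMul R (pvMul M (pvPow M (2 * (e.toNat / 2)))) := pvMul_assoc ..
            _ = pvMul R (pvPow M (2 * (e.toNat / 2) + 1)) := by rw [pvPow_succ_left]
            _ = pvMul R (pvPow M e.toNat) := by congr 2; omega
        · have heq : PySem.Int.band e 1 = 0 := by
            rw [hband, hmod]; omega
          rw [if_neg (by simp [heq])]
          congr 2; omega
      · have h0 : e = 0 := by omega
        simp [h0, pvPow, pvMul_one]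

-- row sums of pvPow (1,1,2,1) k are pvP k
theorem pvRowsum (k : Nat) :
    ((pvPow (1, 1, 2, 1) k).1 + (pvPow (1, 1, 2, 1) k).2.1,
     (pvPow (1, 1, 2, 1) k).2.2.1 + (pvPow (1, 1, 2, 1) k).2.2.2) = pvP k := by
  induction k with
  | zero => rfl
  | succ k ih =>
      have hx := congrArg Prod.fst ih
      have hy := congrArg (fun p => p.2) ih
      dsimp at hx hy
      rw [pvPow_succ_left]
      simp only [pvP, pvMul]
      refine Prod.ext ?_ ?_ <;> dsimp <;> linarith [hx, hy]

-- bridge pvG ↔ pvP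
theorem pvG_eq_pvP (k : Nat) :
    (pvG k).1 = (pvP k).1 ∧ (pvG k).2.1 = (pvP k).2 ∧ (pvG k).2.2 = (pvP k).1 := by
  induction k with
  | zero => exact ⟨rfl, rfl, rfl⟩
  | succ k ih =>
      obtain ⟨h1, h2, h3⟩ := ih
      simp only [pvG, pvP]
      refine ⟨?_, ?_, ?_⟩ <;> dsimp <;> omega

-- the row content after m loop iterations
def pvRow (n : Nat) (m : Nat) (f : Nat → Int) : List Int :=
  (List.range n).map (fun k => if k ≤ m then f k else 0)

theorem pvRow_getD (N m k : Nat) (f : Nat → Int) (hk : k < N) :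
    (pvRow N m f).getD k 0 = if k ≤ m then f k else 0 := by
  simp [pvRow, List.getD_eq_getElem?_getD, hk]

theorem pvRow_set (N m : Nat) (f : Nat → Int) (_hm : m + 1 < N) :
    (pvRow N m f).set (m + 1) (f (m + 1)) = pvRow N (m + 1) f := by
  apply List.ext_getElem
  · simp [pvRow]
  intro k hk1 hk2
  simp only [pvRow, List.length_map, List.length_range] at hk1 hk2
  simp only [pvRow, List.getElem_set, List.getElem_map, List.getElem_range]
  split_ifs with h1 h2 <;> first | rfl | omega | rw [h1]

theorem pvInit (n : Int) (_hn : 2 ≤ n) (f : Nat → Int) (hf : f 0 = 1) :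
    PySem.List.pySetD ((PySem.List.pyRange 0 n 1).map (fun _ => (0 : Int))) 0 1 =
      pvRow n.toNat 0 f := by
  rw [show (0 : Int) = ((0 : Nat) : Int) from rfl, PySem.List.pySetD_natCast,
    PySem.List.pyRange_one]
  apply List.ext_getElem
  · simp [pvRow]
  intro k hk1 hk2
  simp only [List.length_set, List.length_map, List.length_range] at hk1
  simp only [List.getElem_set, List.getElem_map, List.getElem_range, pvRow]
  rcases Nat.eq_zero_or_pos k with h | h
  · simp [h, hf]
  · have hk0 : k ≠ 0 := by omega
    simp [hk0]
    omega

theorem pvRow_zero_eq (N : Nat) (f g : Nat → Int) (hfg : f 0 = g 0) :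
    pvRow N 0 f = pvRow N 0 g := by
  apply List.ext_getElem
  · simp [pvRow]
  intro k hk1 hk2
  simp only [pvRow, List.getElem_map, List.getElem_range]
  rcases Nat.eq_zero_or_pos k with h | h
  · simp [h, hfg]
  · have hk0 : k ≠ 0 := by omega
    simp [hk0]

-- the A-side loop invariant
theorem es2_loop_inv (n : Int) (hn : 2 ≤ n) (m : Nat) (hm : 1 + (m : Int) ≤ n) :
    (PySem.List.pyRange 1 (1 + (m : Int)) 1).foldl es2Body
      (pvRow n.toNat 0 (fun k => (pvG k).1), pvRow n.toNat 0 (fun k => (pvG k).1),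
       pvRow n.toNat 0 (fun k => (pvG k).1), 0) =
    (pvRow n.toNat m (fun k => (pvG k).1), pvRow n.toNat m (fun k => (pvG k).2.1),
     pvRow n.toNat m (fun k => (pvG k).2.2), if m = 0 then 0 else (m : Int)) := by
  induction m with
  | zero =>
      rw [show (1 : Int) + ((0 : Nat) : Int) = 1 by norm_num,
        PySem.List.pyRange_one_eq_nil (le_refl 1)]
      simp only [List.foldl_nil, Nat.cast_zero]
      refine Prod.ext rfl (Prod.ext ?_ (Prod.ext ?_ rfl)) <;> dsimp <;>
        exact pvRow_zero_eq _ _ _ rfl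
  | succ m ih =>
      have hm' : 1 + (m : Int) ≤ n := by push_cast at hm ⊢; omega
      have hcast : 1 + ((m + 1 : Nat) : Int) = (1 + (m : Int)) + 1 := by push_cast; ring
      rw [hcast, PySem.List.pyRange_one_succ_right (by omega), List.foldl_append,
        ih hm']
      simp only [List.foldl_cons, List.foldl_nil]
      -- one step of the body at i = 1 + m
      have hmN : m < n.toNat := by omega
      have hm1N : m + 1 < n.toNat := by push_cast at hm; omega
      have hi1 : (1 : Int) + (m : Int) - 1 = ((m : Nat) : Int) := by ring
      have hi : (1 : Int) + (m : Int) = ((m + 1 : Nat) : Int) := by push_cast; ring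
      simp only [es2Body]
      rw [hi1, hi]
      simp only [PySem.List.pyGetD_natCast, PySem.List.pySetD_natCast]
      rw [pvRow_getD _ _ _ _ hmN, pvRow_getD _ _ _ _ hmN, pvRow_getD _ _ _ _ hmN]
      simp only [le_refl, if_true]
      have e0 : (pvG m).1 + (pvG m).2.1 = (pvG (m + 1)).1 := by simp [pvG]
      rw [e0, pvRow_set _ _ _ hm1N]
      rw [pvRow_getD _ _ _ _ hmN, if_pos (Nat.le_succ m)]
      have e1 : (pvG m).1 + (pvG m).2.1 + (pvG m).2.2 = (pvG (m + 1)).2.1 := by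
        simp [pvG]
      rw [e1, pvRow_set _ _ _ hm1N]
      rw [pvRow_getD _ _ _ _ hmN, if_pos (Nat.le_succ m)]
      have e2 : (pvG m).2.1 + (pvG m).2.2 = (pvG (m + 1)).2.2 := by simp [pvG]
      rw [e2, pvRow_set _ _ _ hm1N]
      simp

-- ===== VERDICT (by name: the statement is the Claim_ definition above) =====
theorem es2_spec : Claim_equal_es2 := by
  intro n _ hn
  have hn2 : (2 : Int) ≤ n := hn
  show es2 n = es2_alt n
  simp only [es2, es2_alt]
  rw [pvInit n hn2 (fun k => (pvG k).1) rfl]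
  have hfold := es2_loop_inv n hn2 (n - 1).toNat (by omega)
  rw [show (1 : Int) + (((n - 1).toNat : Nat) : Int) = n by omega] at hfold
  rw [hfold]
  have hK1 : ((n - 1).toNat : Nat) ≠ 0 := by omega
  simp only [hK1, if_false]
  rw [show (((n - 1).toNat : Nat) : Int) - 1 = (((n - 2).toNat : Nat) : Int) by omega]
  simp only [PySem.List.pyGetD_natCast]
  have hKN : (n - 2).toNat < n.toNat := by omega
  rw [pvRow_getD _ _ _ _ hKN, pvRow_getD _ _ _ _ hKN, pvRow_getD _ _ _ _ hKN,
    if_pos (by omega : (n - 2).toNat ≤ (n - 1).toNat)]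
  have hle : (n - 2).toNat ≤ (n - 1).toNat := by omega
  simp only [hle, if_true]
  rw [pvPowLoop_eq (n - 2).toNat (n - 2) le_rfl (by omega), pvOne_mul]
  have hrs := pvRowsum (n - 2).toNat
  have hx := congrArg Prod.fst hrs
  have hy := congrArg (fun p : Int × Int => p.2) hrs
  dsimp at hx hy
  obtain ⟨h1, h2, h3⟩ := pvG_eq_pvP (n - 2).toNat
  rw [h1, h2, h3]
  linarith [hx, hy]
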